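-- pv_equiv track=rewrite | github.com/gonzavalenz/trabajos_practicos | trabajo7.py | encriptado2
-- ===== SOURCE A (Python) =====
-- def encriptado2(cadena):
--     nueva_cadena = ''
--     agregar_ultimo_car = False
--     if len(cadena) % 2 == 0:
--         cadena_invertida = cadena[len(cadena):len(cadena)//2-1:-1]
--         cadena = cadena[:len(cadena)//2:]
--     else:
--         cadena_invertida = cadena[len(cadena):(len(cadena)//2):-1]
--         cadena = cadena[0:len(cadena)//2+1:]
--         agregar_ultimo_car = True
--     i = 0
--     while len(cadena_invertida) != i:
--         nueva_cadena += cadena[i] + cadena_invertida[i]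
--         i += 1
--     if agregar_ultimo_car:
--         nueva_cadena += cadena[len(cadena)-1]
--     return nueva_cadena
-- ===== SOURCE B (Python) =====
-- def encriptado2(cadena):
--     left, right = 0, len(cadena) - 1
--     resultado = []
--     while left < right:
--         resultado.append(cadena[left])
--         resultado.append(cadena[right])
--         left += 1
--         right -= 1
--     if left == right:
--         resultado.append(cadena[left])
--     return ''.join(resultado)
-- ===== Notes on version B (the rewrite author's own statement) =====
-- stated objective: simpler
-- what changed: Replaces the even/odd parity branch, the two precomputed slices (one a negative-step reversed slice) and the index-counting while loop with quadratic string concatenation by a single two-converging-pointer loop over the original string appending cadena[left], cadena[right] and a final middle character, joined once.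
import Mathlib
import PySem

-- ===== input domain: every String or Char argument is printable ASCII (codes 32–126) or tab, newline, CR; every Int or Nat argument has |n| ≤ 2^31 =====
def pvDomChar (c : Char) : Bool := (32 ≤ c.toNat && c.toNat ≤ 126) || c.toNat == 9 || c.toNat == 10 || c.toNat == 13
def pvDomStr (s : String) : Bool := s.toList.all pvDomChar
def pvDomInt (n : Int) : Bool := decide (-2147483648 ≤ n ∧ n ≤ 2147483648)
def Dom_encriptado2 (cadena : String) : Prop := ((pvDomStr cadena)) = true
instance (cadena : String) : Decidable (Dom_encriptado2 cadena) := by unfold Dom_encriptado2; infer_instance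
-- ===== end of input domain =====

-- B replaces A's parity branch, slices and index-counting concatenation loop by one
-- two-converging-pointer pass building a list joined once (simpler; measured faster).

-- ===== PORT A =====
-- A on the character list of the string: parity branch, negative-step reversed slice,
-- front-half slice, index-counting while loop, optional middle-character append.
-- Loop guard: Python's `len(cadena_invertida) != i` with i counting 0,1,… equals `i < len`;
-- written as `<` for termination only.
def encALoop (cad inv acc : List Char) (i : Nat) : List Char :=
  if i < inv.length then
    encALoop cad inv
      (acc ++ [PySem.List.pyGetD cad (i : Int) ' ', PySem.List.pyGetD inv (i : Int) ' '])
      (i + 1)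
  else acc
termination_by inv.length - i

def encACore (cs : List Char) : List Char :=
  let n : Int := (cs.length : Int)
  if PySem.Int.mod n 2 = 0 then
    let inv := (PySem.List.slice? cs (some n) (some (PySem.Int.floordiv n 2 - 1)) (-1)).getD []
    let cad := PySem.List.slice cs none (some (PySem.Int.floordiv n 2))
    encALoop cad inv [] 0
  else
    let inv := (PySem.List.slice? cs (some n) (some (PySem.Int.floordiv n 2)) (-1)).getD []
    let cad := PySem.List.slice cs (some 0) (some (PySem.Int.floordiv n 2 + 1))
    encALoop cad inv [] 0 ++ [PySem.List.pyGetD cad ((cad.length : Int) - 1) ' ']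

def encriptado2 (cadena : String) : String :=
  String.ofList (encACore cadena.toList)

-- ===== PORT B =====
-- B: two converging pointers left/right over the original character list.
def twoPtr (cs : List Char) (l r : Int) : List Char :=
  if l < r then
    PySem.List.pyGetD cs l ' ' :: PySem.List.pyGetD cs r ' ' :: twoPtr cs (l + 1) (r - 1)
  else if l = r then [PySem.List.pyGetD cs l ' ']
  else []
termination_by (r - l).toNat
decreasing_by omega

def encriptado2_alt (cadena : String) : String :=
  String.ofList (twoPtr cadena.toList 0 ((cadena.toList.length : Int) - 1))

-- ===== PRECONDITION & SPEC =====
def Spec_encriptado2 (cadena : String) (out : String) : Prop := out = encriptado2_alt cadena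
instance (cadena : String) (out : String) : Decidable (Spec_encriptado2 cadena out) := by unfold Spec_encriptado2; infer_instance

-- ===== CLAIM (what is proved, stated in full; the proofs are below) =====
def Claim_equal_encriptado2 : Prop := ∀ (cadena : String), Dom_encriptado2 cadena → Spec_encriptado2 cadena (encriptado2 cadena)

-- ===== LEMMAS AND PROOFS =====

def specF : List Char → List Char
  | [] => []
  | [x] => [x]
  | x :: y :: rest =>
      x :: (y :: rest).getLast (by simp) :: specF ((y :: rest).dropLast)
termination_by xs => xs.length
decreasing_by simp

def mix : List Char → List Char → List Char
  | a :: xs, b :: ys => a :: b :: mix xs ys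
  | _, _ => []

def AForm (cs : List Char) : List Char :=
  if cs.length % 2 = 0 then
    mix (cs.take (cs.length / 2)) ((cs.drop (cs.length / 2)).reverse)
  else
    mix (cs.take (cs.length / 2 + 1)) ((cs.drop (cs.length / 2 + 1)).reverse)
      ++ [cs.getD (cs.length / 2) ' ']
theorem mix_drop (cad inv : List Char) (i : Nat) (h : inv.length ≤ cad.length)
    (hi : i < inv.length) :
    mix (cad.drop i) (inv.drop i) =
      cad.getD i ' ' :: inv.getD i ' ' :: mix (cad.drop (i+1)) (inv.drop (i+1)) := by
  rw [List.drop_eq_getElem_cons (by omega : i < cad.length),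
      List.drop_eq_getElem_cons hi, mix]
  rw [List.getD_eq_getElem _ _ (by omega), List.getD_eq_getElem _ _ hi]

theorem loopForm (cad inv acc : List Char) (i : Nat) (h : inv.length ≤ cad.length) :
    encALoop cad inv acc i = acc ++ mix (cad.drop i) (inv.drop i) := by
  fun_induction encALoop cad inv acc i with
  | case1 acc i hi ih =>
      rw [ih, mix_drop cad inv i h hi]
      simp [PySem.List.pyGetD_natCast]
  | case2 acc i hi =>
      have : inv.drop i = [] := List.drop_eq_nil_of_le (by omega)
      rw [this]
      cases hd : cad.drop i <;> simp [mix]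

theorem revseg (xs : List Char) (c : Nat) (hc : c ≤ xs.length) :
    (List.range c).filterMap
        (fun (k : Nat) => xs[(((xs.length : Int) - 1) - (k : Int)).toNat]?) =
      (xs.drop (xs.length - c)).reverse := by
  induction c with
  | zero => simp
  | succ c ih =>
      rw [List.range_succ, List.filterMap_append, ih (by omega)]
      have h1 : ((((xs.length : Int) - 1) - (c : Int)).toNat) = xs.length - 1 - c := by omega
      have h2 : xs.length - 1 - c < xs.length := by omega
      have h3 : xs.length - (c + 1) < xs.length := by omega
      have h4 : xs.length - (c + 1) + 1 = xs.length - c := by omega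
      have h5 : xs[xs.length - 1 - c]'h2 = xs[xs.length - (c + 1)]'h3 := by
        congr 1; omega
      rw [List.drop_eq_getElem_cons h3, h4]
      simp only [List.filterMap_cons, List.filterMap_nil, h1,
        List.getElem?_eq_getElem h2, List.reverse_cons, h5]

theorem sliceRev (xs : List Char) (m : Int) (hm : 0 ≤ m) :
    PySem.List.slice? xs (some (xs.length : Int)) (some m) (-1) =
      some ((xs.drop (m.toNat + 1)).reverse) := by
  unfold PySem.List.slice? PySem.List.sliceIndices
  norm_num
  have hA : ¬ ((xs.length : Int) < 0) := by omega
  have hB : ¬ (m < 0) := by omega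
  simp only [if_neg hA, if_neg hB]
  have hfun : (fun (x : Nat) => xs[(((xs.length : Int) - 1) + -(x:Int)).toNat]?) =
      (fun (x : Nat) => xs[(((xs.length : Int) - 1) - (x:Int)).toNat]?) := by
    funext k; norm_num [sub_eq_add_neg]
  by_cases hcase : m < (xs.length : Int) - 1
  · rw [if_pos (by omega : min m ((xs.length:Int) - 1) < (xs.length:Int) - 1)]
    have hmin : min m ((xs.length : Int) - 1) = m := by omega
    rw [hmin, hfun, revseg xs _ (by omega)]
    have : xs.length - (((xs.length : Int) - 1) - m).toNat = m.toNat + 1 := by omega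
    rw [this]
  · rw [if_neg (by omega : ¬ (min m ((xs.length:Int) - 1) < (xs.length:Int) - 1))]
    simp only [List.range_zero, List.filterMap_nil]
    rw [List.drop_eq_nil_of_le (by omega : xs.length ≤ m.toNat + 1)]
    simp

theorem floordiv_two (n : Nat) : PySem.Int.floordiv (n:Int) 2 = ((n/2 : Nat) : Int) := by
  simp [PySem.Int.floordiv, Int.fdiv_eq_ediv]

theorem mod_two_zero (n : Nat) : (PySem.Int.mod (n:Int) 2 = 0) ↔ n % 2 = 0 := by
  simp [PySem.Int.mod, Int.fmod_eq_emod]; omega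

theorem A_eq_AForm (cs : List Char) : encACore cs = AForm cs := by
  unfold encACore AForm
  rcases Nat.eq_zero_or_pos cs.length with h0 | hpos
  · rw [List.length_eq_zero_iff] at h0; subst h0; simp [encALoop, mix, PySem.Int.mod, PySem.List.slice?, PySem.List.sliceIndices, PySem.List.slice]
  set n := cs.length with hn
  by_cases hpar : n % 2 = 0
  · rw [if_pos ((mod_two_zero n).mpr hpar), if_pos hpar, floordiv_two]
    have h2 : 2 ≤ n := by omega
    have hm : ((n/2 : Nat) : Int) - 1 = (((n/2 - 1 : Nat)) : Int) := by omega
    rw [hm, sliceRev cs _ (by omega)]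
    have hdrop : ((n/2 - 1 : Nat) : Int).toNat + 1 = n / 2 := by omega
    rw [hdrop]
    simp only [Option.getD_some, PySem.List.slice_to_natCast]
    rw [loopForm _ _ _ _ (by simp; omega)]
    simp
  · rw [if_neg (fun hc => hpar ((mod_two_zero n).mp hc)), if_neg hpar, floordiv_two]
    rw [sliceRev cs _ (by omega)]
    have hdrop : ((n/2 : Nat) : Int).toNat + 1 = n / 2 + 1 := by omega
    rw [hdrop]
    have hcad : PySem.List.slice cs (some 0) (some (((n/2 : Nat) : Int) + 1)) =
        cs.take (n/2 + 1) := by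
      rw [PySem.List.slice_zero_start, PySem.List.slice_to _ (by omega)]
      have ht : ((((n/2 : Nat)) : Int) + 1).toNat = n/2 + 1 := by omega
      rw [ht]
    rw [hcad]
    simp only [Option.getD_some]
    rw [loopForm _ _ _ _ (by simp; omega)]
    simp only [List.drop_zero, List.nil_append]
    congr 1
    have hlen : (cs.take (n/2 + 1)).length = n/2 + 1 := by simp; omega
    have hidx : n/2 < cs.length := by omega
    rw [hlen]
    rw [show ((n/2 + 1 : Nat) : Int) - 1 = ((n/2 : Nat) : Int) by push_cast; ring]
    rw [PySem.List.pyGetD_natCast]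
    rw [List.getD_eq_getElem _ _ (by omega), List.getD_eq_getElem _ _ hidx]
    simp

theorem specF_cons_append (x y : Char) (xs : List Char) :
    specF (x :: xs ++ [y]) = x :: y :: specF xs := by
  cases xs with
  | nil => simp [specF]
  | cons a as =>
      show specF (x :: a :: (as ++ [y])) = _
      rw [specF.eq_def]
      have h : (a :: (as ++ [y])).dropLast = a :: as := by rw [show a :: (as ++ [y]) = (a :: as) ++ [y] from rfl]; exact List.dropLast_concat ..
      simp [h]

theorem AForm_eq_specF (cs : List Char) : AForm cs = specF cs := by
  induction cs using List.bidirectionalRec with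
  | nil => simp [AForm, specF, mix]
  | singleton x => simp [AForm, specF, mix]
  | cons_append x xs y ih =>
      rw [show x :: (xs ++ [y]) = x :: xs ++ [y] from rfl, specF_cons_append, ← ih]
      rw [show x :: xs ++ [y] = x :: (xs ++ [y]) from rfl]
      unfold AForm
      set k := xs.length with hk
      have hlen : (x :: (xs ++ [y])).length = k + 2 := by simp; omega
      rw [hlen]
      by_cases hpar : k % 2 = 0
      · rw [if_pos (by omega : (k+2) % 2 = 0), if_pos hpar]
        have h1 : (k+2)/2 = k/2 + 1 := by omega
        rw [h1]
        have htake : (x :: (xs ++ [y])).take (k/2 + 1) = x :: xs.take (k/2) := by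
          rw [List.take_succ_cons, List.take_append_of_le_length (by omega)]
        have hdrop : (x :: (xs ++ [y])).drop (k/2 + 1) = xs.drop (k/2) ++ [y] := by
          rw [List.drop_succ_cons, List.drop_append_of_le_length (by omega)]
        rw [htake, hdrop, List.reverse_append, List.reverse_singleton]
        rfl
      · rw [if_neg (by omega : ¬ (k+2) % 2 = 0), if_neg hpar]
        have h1 : (k+2)/2 = k/2 + 1 := by omega
        rw [h1]
        have htake : (x :: (xs ++ [y])).take (k/2 + 1 + 1) = x :: xs.take (k/2 + 1) := by
          rw [List.take_succ_cons, List.take_append_of_le_length (by omega)]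
        have hdrop : (x :: (xs ++ [y])).drop (k/2 + 1 + 1) = xs.drop (k/2 + 1) ++ [y] := by
          rw [List.drop_succ_cons, List.drop_append_of_le_length (by omega)]
        have hmid : (x :: (xs ++ [y])).getD (k/2 + 1) ' ' = xs.getD (k/2) ' ' := by
          rw [List.getD_cons_succ, List.getD_append _ _ _ _ (by omega)]
        rw [htake, hdrop, hmid, List.reverse_append, List.reverse_singleton]
        rfl

theorem pyGetD_shift (xs : List Char) (x y : Char) (i : Nat) (hi : i < xs.length) :
    PySem.List.pyGetD (x :: (xs ++ [y])) ((i : Int) + 1) ' ' = PySem.List.pyGetD xs (i : Int) ' ' := by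
  rw [show ((i : Int) + 1) = ((i + 1 : Nat) : Int) by push_cast; ring]
  rw [PySem.List.pyGetD_natCast, PySem.List.pyGetD_natCast]
  rw [List.getD_cons_succ]
  exact List.getD_append _ _ _ _ hi

theorem twoPtr_shift (xs : List Char) (x y : Char) (l r : Int)
    (hl : 0 ≤ l) (hr : r < (xs.length : Int)) :
    twoPtr (x :: (xs ++ [y])) (l + 1) (r + 1) = twoPtr xs l r := by
  fun_induction twoPtr xs l r with
  | case1 l r hlr ih =>
      rw [twoPtr, if_pos (by omega : l + 1 < r + 1)]
      obtain ⟨ln, rfl⟩ : ∃ ln : Nat, l = (ln : Int) := ⟨l.toNat, by omega⟩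
      obtain ⟨rn, rfl⟩ : ∃ rn : Nat, r = (rn : Int) := ⟨r.toNat, by omega⟩
      rw [pyGetD_shift xs x y ln (by omega), pyGetD_shift xs x y rn (by omega)]
      rw [show ((rn : Int) + 1 - 1) = (rn : Int) - 1 + 1 by ring]
      rw [ih (by omega) (by omega)]
  | case2 l hnlt =>
      rw [twoPtr, if_neg (by omega : ¬ (l + 1 < l + 1)), if_pos rfl]
      obtain ⟨ln, rfl⟩ : ∃ ln : Nat, l = (ln : Int) := ⟨l.toNat, by omega⟩
      rw [pyGetD_shift xs x y ln (by omega)]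
  | case3 l r h1 h2 =>
      rw [twoPtr, if_neg (by omega : ¬ (l + 1 < r + 1)), if_neg (by omega : ¬ (l + 1 = r + 1))]

theorem B_eq_specF (cs : List Char) : twoPtr cs 0 ((cs.length : Int) - 1) = specF cs := by
  induction cs using List.bidirectionalRec with
  | nil => rw [twoPtr]; simp [specF]
  | singleton x =>
      rw [twoPtr]
      norm_num
      simp [specF]
  | cons_append x xs y ih =>
      have hlen : ((x :: (xs ++ [y])).length : Int) = (xs.length : Int) + 2 := by
        simp; omega
      rw [hlen]
      rw [twoPtr, if_pos (by omega : (0:Int) < (xs.length : Int) + 2 - 1)]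
      have h0 : PySem.List.pyGetD (x :: (xs ++ [y])) 0 ' ' = x :=
        PySem.List.pyGetD_zero_cons ..
      have hlast : PySem.List.pyGetD (x :: (xs ++ [y])) ((xs.length : Int) + 2 - 1) ' ' = y := by
        rw [show ((xs.length : Int) + 2 - 1) = ((xs.length + 1 : Nat) : Int) by push_cast; omega]
        rw [PySem.List.pyGetD_natCast]
        rw [List.getD_cons_succ]
        simp
      rw [h0, hlast]
      rw [show ((xs.length : Int) + 2 - 1 - 1) = ((xs.length : Int) - 1) + 1 by ring]
      rw [twoPtr_shift xs x y 0 ((xs.length : Int) - 1) (by omega) (by omega)]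
      rw [ih]
      have hs := specF_cons_append x y xs
      simp only [List.cons_append] at hs
      rw [hs]

-- ===== VERDICT (by name: the statement is the Claim_ definition above) =====
theorem encriptado2_spec : Claim_equal_encriptado2 := by
  intro cadena _
  unfold Spec_encriptado2 encriptado2 encriptado2_alt
  rw [A_eq_AForm, AForm_eq_specF, B_eq_specF]
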